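-- pv_equiv track=rewrite | github.com/pypi-data/pypi-mirror-395 | packages/ghtest/ghtest-0.1.6-py3-none-any.whl/ghtest/analyze_tests.py | _compact_names
-- ===== SOURCE A (Python) =====
-- from collections import defaultdict
--
-- def _count_codes(codes):
--     counts = defaultdict(lambda: 0)
--     for code in codes:
--         if isinstance(code, list):
--             for code1 in code:
--                 counts[code1] += 1
--         else:
--             counts[code] += 1
--     return dict(counts)
--
-- def _compact_names(ret):
--     ret1 = {}
--     for p, n, c in ret:
--         ret1[n] = [] if n not in ret1 else ret1[n]
--         ret1[n].append(c)
--     ret2 = {}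
--     for k, v in ret1.items():
--         ret2[k] = _count_codes(v)
--     return ret2
-- ===== SOURCE B (Python) =====
-- def _compact_names(ret):
--     res = {}
--     for _p, n, c in ret:
--         inner = res.setdefault(n, {})
--         inner[c] = inner.get(c, 0) + 1
--     return res
-- ===== Notes on version B (the rewrite author's own statement) =====
-- stated objective: simpler
-- what changed: Single pass maintaining a nested dict name->code->count directly, dropping A's intermediate name->list-of-codes dict and the separate _count_codes rescan.
import Mathlib
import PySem

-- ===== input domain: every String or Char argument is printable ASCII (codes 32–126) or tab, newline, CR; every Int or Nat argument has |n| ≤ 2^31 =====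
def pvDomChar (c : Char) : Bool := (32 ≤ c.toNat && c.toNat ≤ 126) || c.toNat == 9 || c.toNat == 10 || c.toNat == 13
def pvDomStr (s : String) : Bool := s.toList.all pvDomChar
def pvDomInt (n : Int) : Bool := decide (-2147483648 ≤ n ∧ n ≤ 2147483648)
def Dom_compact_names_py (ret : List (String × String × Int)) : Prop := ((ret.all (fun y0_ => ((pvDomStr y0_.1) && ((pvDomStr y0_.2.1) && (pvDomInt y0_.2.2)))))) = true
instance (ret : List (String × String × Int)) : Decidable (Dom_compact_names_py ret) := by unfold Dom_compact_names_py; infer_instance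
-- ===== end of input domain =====

-- B replaces A's two-pass group-then-count (intermediate dict name -> list of codes, rescanned by
-- _count_codes) with one pass maintaining a nested dict name -> code -> count; same O(n), simpler.

-- ===== PORT A =====
-- _count_codes: codes are Ints under the type convention, so the `isinstance(code, list)` branch
-- can never fire; the remaining loop is `counts[code] += 1` on a defaultdict(0).
def countCodesA (codes : List Int) : PySem.Dict Int Int :=
  codes.foldl (fun counts code => counts.modify code 0 (· + 1)) PySem.Dict.empty

def compact_names_py (ret : List (String × String × Int)) : List (String × List (Int × Int)) :=
  let ret1 := ret.foldl (fun d y =>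
      let n := y.2.1
      let c := y.2.2
      let cur := if d.contains n then d.getD n [] else []   -- ret1[n] = [] if n not in ret1 else ret1[n]
      d.insert n (cur ++ [c])) PySem.Dict.empty             -- ret1[n].append(c)
  let ret2 := ret1.items.foldl (fun d kv => d.insert kv.1 (countCodesA kv.2)) PySem.Dict.empty
  ret2.items.map (fun kv => (kv.1, kv.2.items))

-- ===== PORT B =====
def compact_names_py_alt (ret : List (String × String × Int)) : List (String × List (Int × Int)) :=
  (ret.foldl (fun res y =>
      let inner := res.getD y.2.1 PySem.Dict.empty          -- inner = res.setdefault(n, {})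
      res.insert y.2.1 (inner.modify y.2.2 0 (· + 1)))      -- inner[c] = inner.get(c, 0) + 1
    PySem.Dict.empty).items.map (fun kv => (kv.1, kv.2.items))

-- ===== PRECONDITION & SPEC =====
def Spec_compact_names_py (ret : List (String × String × Int)) (out : List (String × List (Int × Int))) : Prop := out = compact_names_py_alt ret
instance (ret : List (String × String × Int)) (out : List (String × List (Int × Int))) : Decidable (Spec_compact_names_py ret out) := by unfold Spec_compact_names_py; infer_instance

-- ===== CLAIM (what is proved, stated in full; the proofs are below) =====
def Claim_equal_compact_names_py : Prop := ∀ (ret : List (String × String × Int)), Dom_compact_names_py ret → Spec_compact_names_py ret (compact_names_py ret)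

-- ===== LEMMAS AND PROOFS =====

-- value-wise Counter of a grouping dict: what B's state is in terms of A's state
def mapCount (d : PySem.Dict String (List Int)) : PySem.Dict String (PySem.Dict Int Int) :=
  PySem.Dict.mk (d.items.map (fun kv => (kv.1, PySem.Dict.counter kv.2)))

theorem countCodesA_eq_counter (codes : List Int) : countCodesA codes = PySem.Dict.counter codes := by
  rw [PySem.Dict.counter_eq_foldl]; rfl

theorem keys_mapCount (d : PySem.Dict String (List Int)) : (mapCount d).keys = d.keys := by
  simp [mapCount, PySem.Dict.keys]

theorem contains_mapCount (d : PySem.Dict String (List Int)) (k : String) :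
    (mapCount d).contains k = d.contains k := by
  rw [PySem.Dict.contains_eq_decide_mem_keys, PySem.Dict.contains_eq_decide_mem_keys, keys_mapCount]

theorem nodup_keys_mapCount (d : PySem.Dict String (List Int)) (h : d.keys.Nodup) :
    (mapCount d).keys.Nodup := by rw [keys_mapCount]; exact h

theorem getD_mapCount (d : PySem.Dict String (List Int)) (n : String) (h : d.keys.Nodup) :
    (mapCount d).getD n PySem.Dict.empty = PySem.Dict.counter (d.getD n []) := by
  cases hc : d.contains n with
  | false =>
      rw [PySem.Dict.getD_of_not_contains d [] hc,
        PySem.Dict.getD_of_not_contains (mapCount d) PySem.Dict.empty (by rw [contains_mapCount]; exact hc)]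
      rfl
  | true =>
      have hs : (d.get? n).isSome := by rw [← PySem.Dict.contains_eq_isSome_get?, hc]
      obtain ⟨w, hw⟩ := Option.isSome_iff_exists.mp hs
      have hmem : (n, w) ∈ d.items := PySem.Dict.mem_items_of_get?_eq_some d hw
      have hmem' : (n, PySem.Dict.counter w) ∈ (mapCount d).items := by
        simp only [mapCount]
        exact List.mem_map.mpr ⟨(n, w), hmem, rfl⟩
      rw [PySem.Dict.getD_of_mem_items (mapCount d) hmem' (nodup_keys_mapCount d h),
        PySem.Dict.getD_of_mem_items d hmem h]

theorem mapCount_insert (d : PySem.Dict String (List Int)) (n : String) (v : List Int) :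
    mapCount (d.insert n v) = (mapCount d).insert n (PySem.Dict.counter v) := by
  apply PySem.Dict.ext
  show (d.insert n v).items.map _ = ((mapCount d).insert n _).items
  rw [PySem.Dict.items_insert, PySem.Dict.items_insert, contains_mapCount]
  cases hc : d.contains n with
  | false =>
      simp [mapCount]
  | true =>
      simp only [mapCount, if_true, List.map_map]
      apply List.map_congr_left
      intro p _
      by_cases hp : p.1 == n
      · simp [hp, Function.comp]
      · simp [hp, Function.comp]

-- A's conditional "[] if n not in ret1 else ret1[n]" is just getD n []
theorem cond_getD (d : PySem.Dict String (List Int)) (n : String) :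
    (if d.contains n then d.getD n [] else []) = d.getD n [] := by
  cases hc : d.contains n with
  | false =>
      rw [if_neg (by simp)]
      exact (PySem.Dict.getD_of_not_contains d [] hc).symm
  | true => rfl

-- main invariant: B's fold from mapCount d tracks mapCount of A's grouping fold from d
theorem mainInv (l : List (String × String × Int)) (d : PySem.Dict String (List Int))
    (h : d.keys.Nodup) :
    l.foldl (fun res y =>
        res.insert y.2.1 ((res.getD y.2.1 PySem.Dict.empty).modify y.2.2 0 (· + 1))) (mapCount d)
    = mapCount (l.foldl (fun d y =>
        d.insert y.2.1 ((if d.contains y.2.1 then d.getD y.2.1 [] else []) ++ [y.2.2])) d) := by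
  induction l generalizing d with
  | nil => rfl
  | cons y rest ih =>
      simp only [List.foldl_cons]
      rw [show (mapCount d).insert y.2.1 (((mapCount d).getD y.2.1 PySem.Dict.empty).modify y.2.2 0 (· + 1))
            = mapCount (d.insert y.2.1 ((if d.contains y.2.1 then d.getD y.2.1 [] else []) ++ [y.2.2])) by
          rw [cond_getD, mapCount_insert, PySem.Dict.counter_append_singleton, getD_mapCount d _ h]]
      exact ih _ (PySem.Dict.nodup_keys_insert _ _ _ h)

-- ===== VERDICT (by name: the statement is the Claim_ definition above) =====
theorem compact_names_py_spec : Claim_equal_compact_names_py := by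
  intro ret _
  show compact_names_py ret = compact_names_py_alt ret
  have hA : compact_names_py ret = List.map (fun kv => (kv.1, kv.2.items))
      ((List.foldl (fun d kv => d.insert kv.1 (countCodesA kv.2)) PySem.Dict.empty
        (ret.foldl (fun d y =>
          d.insert y.2.1 ((if d.contains y.2.1 then d.getD y.2.1 [] else []) ++ [y.2.2]))
          PySem.Dict.empty).items).items) := rfl
  have hAlt : compact_names_py_alt ret = List.map (fun kv => (kv.1, kv.2.items))
      ((ret.foldl (fun res y =>
          res.insert y.2.1 ((res.getD y.2.1 PySem.Dict.empty).modify y.2.2 0 (· + 1)))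
        PySem.Dict.empty).items) := rfl
  have hB := mainInv ret PySem.Dict.empty PySem.Dict.nodup_keys_empty
  rw [show mapCount PySem.Dict.empty = PySem.Dict.empty from rfl] at hB
  have hnd : (ret.foldl (fun d y =>
      d.insert y.2.1 ((if d.contains y.2.1 then d.getD y.2.1 [] else []) ++ [y.2.2]))
      PySem.Dict.empty).keys.Nodup :=
    PySem.Dict.nodup_keys_foldl_insert_key ret (fun y => y.2.1) _ _ PySem.Dict.nodup_keys_empty
  rw [hA, hAlt, hB]
  congr 1
  have hfresh := PySem.Dict.items_foldl_insert_fresh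
    ((ret.foldl (fun d y =>
        d.insert y.2.1 ((if d.contains y.2.1 then d.getD y.2.1 [] else []) ++ [y.2.2]))
      PySem.Dict.empty).items)
    (fun kv : String × List Int => kv.1) (fun kv => countCodesA kv.2) PySem.Dict.empty
    (fun a _ => PySem.Dict.contains_empty _) (by simpa [PySem.Dict.keys] using hnd)
  simp only [hfresh]
  simp [mapCount, countCodesA_eq_counter, PySem.Dict.empty]
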